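-- pv_equiv track=rewrite | github.com/nngabe/llm2kg | web_search/search_client.py | _is_trusted_domain
-- ===== SOURCE A (Python) =====
-- from typing import List, Optional, Dict, Any
--
-- def _is_trusted_domain(domain: str, trusted_domains: List[str]) -> bool:
--     """Check if domain matches any trusted domain pattern."""
--     domain_lower = domain.lower()
--     for trusted in trusted_domains:
--         trusted_lower = trusted.lower()
--         if trusted_lower.startswith("."):
--             if domain_lower.endswith(trusted_lower):
--                 return True
--         elif domain_lower == trusted_lower or domain_lower.endswith("." + trusted_lower):
--             return True
--     return False
-- ===== SOURCE B (Python) =====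
-- from typing import List
--
-- def _is_trusted_domain(domain: str, trusted_domains: List[str]) -> bool:
--     """Check if domain matches any trusted domain pattern."""
--     d = domain.lower()
--     # Index the domain once: every suffix of d that starts at a '.' (what a
--     # dot-pattern can match), and d itself plus every tail after a '.' (what a
--     # bare pattern can match). Each pattern then needs one set lookup only.
--     dot_suffixes = set()
--     bare = {d}
--     for i in range(len(d)):
--         if d[i] == ".":
--             dot_suffixes.add(d[i:])
--             bare.add(d[i + 1:])
--     return any(
--         (p in dot_suffixes) if p.startswith(".") else (p in bare)
--         for p in (t.lower() for t in trusted_domains)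
--     )
-- ===== Notes on version B (the rewrite author's own statement) =====
-- stated objective: alternative
-- what changed: Inverts the roles: instead of testing each pattern against the domain with equality/endswith comparisons, B indexes the domain once into two sets of its dot-boundary suffixes and answers each pattern with a single set membership lookup.
import Mathlib
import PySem

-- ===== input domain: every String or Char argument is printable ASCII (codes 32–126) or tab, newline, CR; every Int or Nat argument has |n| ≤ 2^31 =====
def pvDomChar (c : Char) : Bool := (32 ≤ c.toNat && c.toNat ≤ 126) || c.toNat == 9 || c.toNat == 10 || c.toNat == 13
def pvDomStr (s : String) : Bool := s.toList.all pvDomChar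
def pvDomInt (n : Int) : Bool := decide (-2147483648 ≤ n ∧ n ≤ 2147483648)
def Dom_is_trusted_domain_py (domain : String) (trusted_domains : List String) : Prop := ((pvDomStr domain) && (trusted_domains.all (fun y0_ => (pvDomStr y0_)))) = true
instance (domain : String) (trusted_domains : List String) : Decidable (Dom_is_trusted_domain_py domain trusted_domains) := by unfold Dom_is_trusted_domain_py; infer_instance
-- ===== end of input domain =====

-- B inverts the algorithm: it indexes the domain's dot-boundary suffixes into two sets once,
-- then answers each pattern by set membership instead of per-pattern endswith tests.

-- ===== PORT A =====
-- the for-loop of A: test each trusted pattern, return True on the first match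
def pvALoop (dl : List Char) : List String → Bool
  | [] => false
  | t :: rest =>
    let tl := PySem.Chars.lower t.toList
    if PySem.Chars.startswith tl ['.'] then
      if PySem.Chars.endswith dl tl then true else pvALoop dl rest
    else if dl = tl || PySem.Chars.endswith dl ('.' :: tl) then true
    else pvALoop dl rest

def is_trusted_domain_py (domain : String) (trusted_domains : List String) : Bool :=
  pvALoop (PySem.Chars.lower domain.toList) trusted_domains

-- ===== PORT B =====
-- B's indexing loop: for i in range(len(d)): if d[i]=='.': add d[i:], d[i+1:]
def pvBIndex (dl : List Char) : PySem.Set (List Char) × PySem.Set (List Char) :=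
  (List.range dl.length).foldl
    (fun acc i =>
      if dl.getD i ' ' = '.' then
        (PySem.Set.add acc.1 (dl.drop i), PySem.Set.add acc.2 (dl.drop (i + 1)))
      else acc)
    (PySem.Set.empty, PySem.Set.add PySem.Set.empty dl)

def is_trusted_domain_py_alt (domain : String) (trusted_domains : List String) : Bool :=
  let dl := PySem.Chars.lower domain.toList
  let idx := pvBIndex dl
  trusted_domains.any (fun t =>
    let p := PySem.Chars.lower t.toList
    if PySem.Chars.startswith p ['.'] then PySem.Set.contains idx.1 p
    else PySem.Set.contains idx.2 p)

-- ===== PRECONDITION & SPEC =====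
def Spec_is_trusted_domain_py (domain : String) (trusted_domains : List String) (out : Bool) : Prop := out = is_trusted_domain_py_alt domain trusted_domains
instance (domain : String) (trusted_domains : List String) (out : Bool) : Decidable (Spec_is_trusted_domain_py domain trusted_domains out) := by unfold Spec_is_trusted_domain_py; infer_instance

-- ===== CLAIM (what is proved, stated in full; the proofs are below) =====
def Claim_equal_is_trusted_domain_py : Prop := ∀ (domain : String) (trusted_domains : List String), Dom_is_trusted_domain_py domain trusted_domains → Spec_is_trusted_domain_py domain trusted_domains (is_trusted_domain_py domain trusted_domains)

-- ===== LEMMAS AND PROOFS =====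

-- A's per-element test, and A's loop as an `any`
def pvTest (dl p : List Char) : Bool :=
  if PySem.Chars.startswith p ['.'] then PySem.Chars.endswith dl p
  else dl = p || PySem.Chars.endswith dl ('.' :: p)

lemma pvALoop_eq_any (dl : List Char) (ts : List String) :
    pvALoop dl ts = ts.any (fun t => pvTest dl (PySem.Chars.lower t.toList)) := by
  induction ts with
  | nil => simp [pvALoop]
  | cons t rest ih =>
    simp only [pvALoop, List.any_cons, pvTest]
    by_cases h1 : PySem.Chars.startswith (PySem.Chars.lower t.toList) ['.'] = true
    · by_cases h2 : PySem.Chars.endswith dl (PySem.Chars.lower t.toList) = true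
      · simp [h1, h2]
      · simp [h1, h2, ih, pvTest]
    · by_cases h2 : (decide (dl = PySem.Chars.lower t.toList) ||
          PySem.Chars.endswith dl ('.' :: PySem.Chars.lower t.toList)) = true
      · simp [h1, h2]
      · simp [h1, h2, ih, pvTest]

-- membership characterisation of the two index sets built by pvBIndex (truncated to n steps)
lemma pvBIndex_mem (dl : List Char) (n : Nat) (hn : n ≤ dl.length) :
    (∀ x, x ∈ ((List.range n).foldl
        (fun acc i =>
          if dl.getD i ' ' = '.' then
            (PySem.Set.add acc.1 (dl.drop i), PySem.Set.add acc.2 (dl.drop (i + 1)))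
          else acc)
        (PySem.Set.empty, PySem.Set.add PySem.Set.empty dl)).1 ↔
      ∃ i, i < n ∧ dl[i]? = some '.' ∧ x = dl.drop i) ∧
    (∀ x, x ∈ ((List.range n).foldl
        (fun acc i =>
          if dl.getD i ' ' = '.' then
            (PySem.Set.add acc.1 (dl.drop i), PySem.Set.add acc.2 (dl.drop (i + 1)))
          else acc)
        (PySem.Set.empty, PySem.Set.add PySem.Set.empty dl)).2 ↔
      x = dl ∨ ∃ i, i < n ∧ dl[i]? = some '.' ∧ x = dl.drop (i + 1)) := by
  induction n with
  | zero =>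
    constructor <;> intro x <;>
      simp [PySem.Set.empty]
  | succ n ih =>
    have hn' : n ≤ dl.length := by omega
    obtain ⟨ih1, ih2⟩ := ih hn'
    have hlt : n < dl.length := by omega
    have hget : dl.getD n ' ' = dl[n] := List.getD_eq_getElem dl ' ' hlt
    rw [List.range_succ]
    simp only [List.foldl_append, List.foldl_cons, List.foldl_nil]
    rw [hget]
    by_cases hd : dl[n] = '.'
    · rw [if_pos hd]
      constructor <;> intro x
      · rw [PySem.Set.mem_add, ih1]
        constructor
        · rintro (⟨i, hi, h1, h2⟩ | rfl)
          · exact ⟨i, by omega, h1, h2⟩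
          · exact ⟨n, by omega, by simp [hd, List.getElem?_eq_getElem hlt], rfl⟩
        · rintro ⟨i, hi, h1, h2⟩
          by_cases hin : i = n
          · subst hin; right; exact h2
          · left; exact ⟨i, by omega, h1, h2⟩
      · rw [PySem.Set.mem_add, ih2]
        constructor
        · rintro ((rfl | ⟨i, hi, h1, h2⟩) | rfl)
          · left; rfl
          · right; exact ⟨i, by omega, h1, h2⟩
          · right; exact ⟨n, by omega, by simp [hd, List.getElem?_eq_getElem hlt], rfl⟩
        · rintro (rfl | ⟨i, hi, h1, h2⟩)
          · left; left; rfl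
          · by_cases hin : i = n
            · subst hin; right; exact h2
            · left; right; exact ⟨i, by omega, h1, h2⟩
    · rw [if_neg hd]
      constructor <;> intro x
      · rw [ih1]
        constructor
        · rintro ⟨i, hi, h1, h2⟩; exact ⟨i, by omega, h1, h2⟩
        · rintro ⟨i, hi, h1, h2⟩
          have : i ≠ n := by
            intro h; subst h
            rw [List.getElem?_eq_getElem hlt] at h1
            exact hd (Option.some.inj h1)
          exact ⟨i, by omega, h1, h2⟩
      · rw [ih2]
        constructor
        · rintro (rfl | ⟨i, hi, h1, h2⟩)
          · left; rfl
          · right; exact ⟨i, by omega, h1, h2⟩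
        · rintro (rfl | ⟨i, hi, h1, h2⟩)
          · left; rfl
          · have : i ≠ n := by
              intro h; subst h
              rw [List.getElem?_eq_getElem hlt] at h1
              exact hd (Option.some.inj h1)
            right; exact ⟨i, by omega, h1, h2⟩

-- a dot-headed pattern is in the first index set iff it is a suffix of the domain
lemma mem_fst_iff_suffix (dl p : List Char) (hp : ['.'] <+: p) :
    p ∈ (pvBIndex dl).1 ↔ p <:+ dl := by
  rw [pvBIndex]
  rw [(pvBIndex_mem dl dl.length le_rfl).1 p]
  constructor
  · rintro ⟨i, hi, h1, rfl⟩; exact List.drop_suffix i dl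
  · rintro ⟨t, rfl⟩
    obtain ⟨q, rfl⟩ := hp
    refine ⟨t.length, by simp, ?_, ?_⟩
    · rw [List.getElem?_append_right le_rfl]
      simp
    · simp

-- a bare pattern is in the second index set iff it is the domain or a tail after a dot
lemma mem_snd_iff (dl p : List Char) :
    p ∈ (pvBIndex dl).2 ↔ (p = dl ∨ ('.' :: p) <:+ dl) := by
  rw [pvBIndex]
  rw [(pvBIndex_mem dl dl.length le_rfl).2 p]
  constructor
  · rintro (rfl | ⟨i, hi, h1, rfl⟩)
    · left; rfl
    · right
      refine ⟨dl.take i, ?_⟩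
      have hdot : dl[i] = '.' := by
        rw [List.getElem?_eq_getElem hi] at h1
        exact Option.some.inj h1
      rw [← hdot, List.getElem_cons_drop, List.take_append_drop]
  · rintro (rfl | ⟨t, ht⟩)
    · left; rfl
    · right
      refine ⟨t.length, ?_, ?_, ?_⟩
      · have := congrArg List.length ht; simp at this; omega
      · rw [← ht, List.getElem?_append_right le_rfl]; simp
      · rw [← ht]
        have hl : t.length + 1 = (t ++ ['.']).length := by simp
        rw [show t ++ '.' :: p = (t ++ ['.']) ++ p by simp, hl,
          List.drop_append_of_le_length le_rfl]
        simp

-- A's per-element test equals B's set lookup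
lemma pvTest_eq (dl p : List Char) :
    pvTest dl p =
      (if PySem.Chars.startswith p ['.'] then PySem.Set.contains (pvBIndex dl).1 p
       else PySem.Set.contains (pvBIndex dl).2 p) := by
  unfold pvTest
  by_cases hs : PySem.Chars.startswith p ['.'] = true
  · simp only [hs, if_true]
    rw [Bool.eq_iff_iff, PySem.Chars.endswith_iff, PySem.Set.contains_iff,
      mem_fst_iff_suffix dl p (((PySem.Chars.startswith_iff p ['.']).mp hs))]
  · simp only [hs, Bool.false_eq_true, if_false]
    rw [Bool.eq_iff_iff, PySem.Set.contains_iff, mem_snd_iff]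
    simp only [Bool.or_eq_true, decide_eq_true_eq, PySem.Chars.endswith_iff]
    constructor
    · rintro (h | h)
      · exact Or.inl h.symm
      · exact Or.inr h
    · rintro (h | h)
      · exact Or.inl h.symm
      · exact Or.inr h

-- ===== VERDICT (by name: the statement is the Claim_ definition above) =====
theorem is_trusted_domain_py_spec : Claim_equal_is_trusted_domain_py := by
  intro domain trusted_domains _
  unfold Spec_is_trusted_domain_py is_trusted_domain_py is_trusted_domain_py_alt
  rw [pvALoop_eq_any]
  simp only [pvTest_eq]
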